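-- pv_equiv track=rewrite | github.com/ccomkhj/tcia-handler | tools/generate_training_metadata.py | get_t2_context_indices
-- ===== SOURCE A (Python) =====
-- def get_t2_context_indices(
--     center_idx: int,
--     num_slices: int,
--     context_size: int = 5
-- ) -> list[int]:
--     """
--     Get T2 context slice indices with edge replication padding.
--
--     Args:
--         center_idx: The center slice index
--         num_slices: Total number of slices in the volume
--         context_size: Number of context slices (must be odd)
--
--     Returns:
--         List of slice indices for the context window
--     """
--     half = context_size // 2
--     indices = []
--
--     for offset in range(-half, half + 1):
--         idx = center_idx + offset
--         # Edge replication: clamp to valid range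
--         idx = max(0, min(num_slices - 1, idx))
--         indices.append(idx)
--
--     return indices
-- ===== SOURCE B (Python) =====
-- def get_t2_context_indices(
--     center_idx: int,
--     num_slices: int,
--     context_size: int = 5
-- ) -> list[int]:
--     """Edge-replication context window built from three segments:
--     left padding, the in-range run, right padding."""
--     half = context_size // 2
--     n = 2 * half + 1
--     if n <= 0:
--         return []
--     if num_slices <= 0:
--         return [0] * n
--     lo = center_idx - half
--     hi = center_idx + half
--     left = max(0, min(n, -lo))
--     right = max(0, min(n, hi - (num_slices - 1)))
--     mid = list(range(max(lo, 0), min(hi, num_slices - 1) + 1))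
--     return [0] * left + mid + [num_slices - 1] * right
-- ===== Notes on version B (the rewrite author's own statement) =====
-- stated objective: faster
-- what changed: Replaces the per-offset Python loop that clamps every index with arithmetic: count the left/right out-of-range offsets and build the result as [0]*left + list(range(lo,hi+1)) + [num_slices-1]*right.
import Mathlib
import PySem

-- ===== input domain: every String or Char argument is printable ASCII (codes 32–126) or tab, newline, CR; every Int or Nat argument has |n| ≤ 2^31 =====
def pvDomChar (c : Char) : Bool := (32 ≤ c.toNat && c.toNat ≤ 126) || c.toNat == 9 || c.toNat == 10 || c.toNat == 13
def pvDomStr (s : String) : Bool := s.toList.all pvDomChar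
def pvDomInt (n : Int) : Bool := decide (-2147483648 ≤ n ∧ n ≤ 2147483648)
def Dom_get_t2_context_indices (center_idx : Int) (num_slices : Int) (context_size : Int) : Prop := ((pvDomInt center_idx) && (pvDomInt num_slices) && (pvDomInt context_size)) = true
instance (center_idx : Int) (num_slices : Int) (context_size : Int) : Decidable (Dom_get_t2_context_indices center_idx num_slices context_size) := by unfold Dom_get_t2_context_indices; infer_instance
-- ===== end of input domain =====

-- B replaces A's per-offset clamping loop by three-segment construction (left pad ++ in-range run ++ right pad); objective: constant-factor speedup measured (bulk range/replicate construction instead of a per-element loop).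

-- ===== PORT A =====
def get_t2_context_indices (center_idx : Int) (num_slices : Int) (context_size : Int) : List Int :=
  let half := PySem.Int.floordiv context_size 2
  let indices : List Int := []
  (PySem.List.pyRange (-half) (half + 1) 1).foldl
    (fun acc offset =>
      let idx := center_idx + offset
      let idx := max 0 (min (num_slices - 1) idx)
      acc ++ [idx]) indices

-- ===== PORT B =====
def get_t2_context_indices_alt (center_idx : Int) (num_slices : Int) (context_size : Int) : List Int :=
  let half := PySem.Int.floordiv context_size 2
  let n := 2 * half + 1
  if n ≤ 0 then []
  else if num_slices ≤ 0 then List.replicate n.toNat 0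
  else
    let lo := center_idx - half
    let hi := center_idx + half
    let left := max 0 (min n (-lo))
    let right := max 0 (min n (hi - (num_slices - 1)))
    let mid := PySem.List.pyRange (max lo 0) (min hi (num_slices - 1) + 1) 1
    List.replicate left.toNat 0 ++ mid ++ List.replicate right.toNat (num_slices - 1)

-- ===== PRECONDITION & SPEC =====
def Spec_get_t2_context_indices (center_idx : Int) (num_slices : Int) (context_size : Int) (out : List Int) : Prop := out = get_t2_context_indices_alt center_idx num_slices context_size
instance (center_idx : Int) (num_slices : Int) (context_size : Int) (out : List Int) : Decidable (Spec_get_t2_context_indices center_idx num_slices context_size out) := by unfold Spec_get_t2_context_indices; infer_instance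

-- ===== CLAIM (what is proved, stated in full; the proofs are below) =====
def Claim_equal_get_t2_context_indices : Prop := ∀ (center_idx : Int) (num_slices : Int) (context_size : Int), Dom_get_t2_context_indices center_idx num_slices context_size → Spec_get_t2_context_indices center_idx num_slices context_size (get_t2_context_indices center_idx num_slices context_size)

-- ===== LEMMAS AND PROOFS =====

-- A's snoc-folding loop is map over the range of offsets.
theorem foldl_snoc_eq_map (f : Int → Int) :
    ∀ (xs : List Int) (acc : List Int),
      xs.foldl (fun acc o => acc ++ [f o]) acc = acc ++ xs.map f := by
  intro xs
  induction xs with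
  | nil => intro acc; simp
  | cons x xs ih => intro acc; simp [List.foldl_cons, ih]

-- Clamping every element of an integer range equals left pad ++ in-range run ++ right pad.
theorem map_clamp_pyRange (ns c : Int) (hns : 0 < ns) :
    ∀ (k : Nat) (a b : Int), (b - a).toNat = k →
      (PySem.List.pyRange a b 1).map (fun o => max 0 (min (ns - 1) (c + o))) =
        List.replicate (min (b - a) (-(c + a))).toNat 0
          ++ PySem.List.pyRange (max (c + a) 0) (min (c + b) ns) 1
          ++ List.replicate (min (b - a) (c + b - ns)).toNat (ns - 1) := by
  intro k
  induction k with
  | zero =>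
      intro a b h
      have hba : b ≤ a := by omega
      rw [PySem.List.pyRange_one_eq_nil hba, PySem.List.pyRange_one_eq_nil (by omega)]
      have e2 : (min (b - a) (c + b - ns)).toNat = 0 := by omega
      simp [e2]
      omega
  | succ k ih =>
      intro a b h
      have hab : a < b := by omega
      rw [PySem.List.pyRange_one_cons hab, List.map_cons, ih (a + 1) b (by omega)]
      by_cases h1 : c + a < 0
      · -- left-pad element: clamps to 0
        have hf : max 0 (min (ns - 1) (c + a)) = 0 := by omega
        have e1 : (min (b - a) (-(c + a))).toNat
            = (min (b - (a + 1)) (-(c + (a + 1)))).toNat + 1 := by omega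
        have e2 : max (c + (a + 1)) 0 = max (c + a) 0 := by omega
        have e3 : (min (b - (a + 1)) (c + b - ns)).toNat
            = (min (b - a) (c + b - ns)).toNat := by omega
        simp only [hf, e1, e2, e3, List.replicate_succ, List.cons_append]
      · by_cases h2 : c + a ≤ ns - 1
        · -- in-range element
          have hf : max 0 (min (ns - 1) (c + a)) = c + a := by omega
          have e1 : (min (b - a) (-(c + a))).toNat = 0 := by omega
          have e1' : (min (b - (a + 1)) (-(c + (a + 1)))).toNat = 0 := by omega
          have e2 : max (c + a) 0 = c + a := by omega
          have e2' : max (c + (a + 1)) 0 = c + a + 1 := by omega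
          have e3 : (min (b - (a + 1)) (c + b - ns)).toNat
              = (min (b - a) (c + b - ns)).toNat := by omega
          rw [e1, e1', e2, e2', e3,
            PySem.List.pyRange_one_cons (a := c + a) (b := min (c + b) ns) (by omega)]
          simp [hf]
        · -- right-pad element: clamps to ns - 1
          have hf : max 0 (min (ns - 1) (c + a)) = ns - 1 := by omega
          have e1 : (min (b - a) (-(c + a))).toNat = 0 := by omega
          have e1' : (min (b - (a + 1)) (-(c + (a + 1)))).toNat = 0 := by omega
          have e3 : (min (b - a) (c + b - ns)).toNat
              = (min (b - (a + 1)) (c + b - ns)).toNat + 1 := by omega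
          rw [e1, e1', e3,
            PySem.List.pyRange_one_eq_nil (a := max (c + a) 0) (by omega),
            PySem.List.pyRange_one_eq_nil (a := max (c + (a + 1)) 0) (by omega)]
          simp [hf, List.replicate_succ]

-- ===== VERDICT (by name: the statement is the Claim_ definition above) =====
theorem get_t2_context_indices_spec : Claim_equal_get_t2_context_indices := by
  intro c ns cs _
  unfold Spec_get_t2_context_indices get_t2_context_indices get_t2_context_indices_alt
  simp only []
  set half := PySem.Int.floordiv cs 2 with hhalf
  rw [foldl_snoc_eq_map]
  simp only [List.nil_append]
  by_cases hn : 2 * half + 1 ≤ 0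
  · rw [PySem.List.pyRange_one_eq_nil (by omega), if_pos hn]
    simp
  · rw [if_neg hn]
    by_cases hs : ns ≤ 0
    · rw [if_pos hs]
      rw [List.eq_replicate_iff]
      refine ⟨by simp [PySem.List.length_pyRange_one]; omega, ?_⟩
      intro x hx
      simp only [List.mem_map] at hx
      obtain ⟨o, _, rfl⟩ := hx
      omega
    · rw [if_neg hs]
      rw [map_clamp_pyRange ns c (by omega) ((half + 1 - (-half)).toNat) (-half) (half + 1) rfl]
      have e1 : (min (half + 1 - (-half)) (-(c + (-half)))).toNat
          = (max 0 (min (2 * half + 1) (-(c - half)))).toNat := by omega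
      have e2 : max (c + (-half)) 0 = max (c - half) 0 := by omega
      have e2' : min (c + (half + 1)) ns = min (c + half) (ns - 1) + 1 := by omega
      have e3 : (min (half + 1 - (-half)) (c + (half + 1) - ns)).toNat
          = (max 0 (min (2 * half + 1) (c + half - (ns - 1)))).toNat := by omega
      rw [e1, e2, e2', e3]
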